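-- pv_equiv track=rewrite | github.com/jih3508/Study-Algorithm | Python/programmers/Level1/체육복.py | solution
-- ===== SOURCE A (Python) =====
-- def solution(n, lost, reserve):
--     set_lost = set(lost) - set(reserve)
--     set_reserve = set(reserve) - set(lost)
--
--
--     for num in sorted(set_reserve):
--         if num - 1 in set_lost:
--             set_lost.remove(num - 1)
--         elif num + 1 in set_lost:
--             set_lost.remove(num + 1)
--
--     return n - len(set_lost)
-- ===== SOURCE B (Python) =====
-- def solution(n, lost, reserve):
--     L = sorted(set(lost) - set(reserve))
--     R = sorted(set(reserve) - set(lost))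
--     i = j = matched = 0
--     while i < len(L) and j < len(R):
--         if R[j] < L[i] - 1:
--             j += 1
--         elif R[j] > L[i] + 1:
--             i += 1
--         else:
--             matched += 1
--             i += 1
--             j += 1
--     return n - (len(L) - matched)
-- ===== Notes on version B (the rewrite author's own statement) =====
-- stated objective: alternative
-- what changed: Replaces A's loop over sorted reserves that mutates a lost-set (membership test + remove per reserve) with a two-pointer linear merge of the two sorted cancelled sets that counts matches directly.
import Mathlib
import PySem

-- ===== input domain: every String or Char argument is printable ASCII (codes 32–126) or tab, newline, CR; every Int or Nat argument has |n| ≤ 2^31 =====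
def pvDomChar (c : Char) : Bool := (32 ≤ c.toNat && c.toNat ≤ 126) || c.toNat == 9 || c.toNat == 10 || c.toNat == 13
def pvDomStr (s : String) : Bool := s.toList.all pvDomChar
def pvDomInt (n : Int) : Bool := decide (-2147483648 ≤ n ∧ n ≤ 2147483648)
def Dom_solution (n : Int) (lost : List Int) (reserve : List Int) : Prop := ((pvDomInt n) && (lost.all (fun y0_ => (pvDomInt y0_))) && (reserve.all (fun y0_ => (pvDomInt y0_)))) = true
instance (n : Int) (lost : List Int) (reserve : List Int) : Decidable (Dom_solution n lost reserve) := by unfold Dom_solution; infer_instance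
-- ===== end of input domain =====

-- B replaces A's per-reserve set mutation with a two-pointer merge of the two sorted cancelled sets (alternative algorithm, same result).


-- ===== PORT A =====
-- one iteration of A's loop body: `if num-1 in set_lost: remove` / `elif num+1 in set_lost: remove`
def pvStep (s : PySem.Set Int) (num : Int) : PySem.Set Int :=
  if PySem.Set.contains s (num - 1) then (PySem.Set.remove? s (num - 1)).getD s
  else if PySem.Set.contains s (num + 1) then (PySem.Set.remove? s (num + 1)).getD s
  else s

def solution (n : Int) (lost : List Int) (reserve : List Int) : Int :=
  let setLost : PySem.Set Int := PySem.Set.diff (PySem.Set.ofList lost) (PySem.Set.ofList reserve)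
  let setReserve : PySem.Set Int := PySem.Set.diff (PySem.Set.ofList reserve) (PySem.Set.ofList lost)
  let final := List.foldl pvStep setLost (PySem.List.sorted setReserve (fun x => x) false)
  n - (PySem.Set.len final : Int)

-- ===== PORT B =====
-- the two-pointer while loop of Source B, as recursion on the two sorted lists
def altMatched : List Int → List Int → Int
  | [], _ => 0
  | _ :: _, [] => 0
  | l :: ls, r :: rs =>
    if r < l - 1 then altMatched (l :: ls) rs
    else if r > l + 1 then altMatched ls (r :: rs)
    else 1 + altMatched ls rs
termination_by L R => L.length + R.length

def solution_alt (n : Int) (lost : List Int) (reserve : List Int) : Int :=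
  let L := PySem.List.sorted (PySem.Set.diff (PySem.Set.ofList lost) (PySem.Set.ofList reserve)) (fun x => x) false
  let R := PySem.List.sorted (PySem.Set.diff (PySem.Set.ofList reserve) (PySem.Set.ofList lost)) (fun x => x) false
  n - ((L.length : Int) - altMatched L R)

-- ===== PRECONDITION & SPEC =====
def Spec_solution (n : Int) (lost : List Int) (reserve : List Int) (out : Int) : Prop := out = solution_alt n lost reserve
instance (n : Int) (lost : List Int) (reserve : List Int) (out : Int) : Decidable (Spec_solution n lost reserve out) := by unfold Spec_solution; infer_instance

-- ===== CLAIM (what is proved, stated in full; the proofs are below) =====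
def Claim_equal_solution : Prop := ∀ (n : Int) (lost : List Int) (reserve : List Int), Dom_solution n lost reserve → Spec_solution n lost reserve (solution n lost reserve)

-- ===== LEMMAS AND PROOFS =====

theorem pvStep_eq (s : List Int) (num : Int) :
    pvStep s num =
      if (num - 1) ∈ s then s.filter (fun y => !(y == num - 1))
      else if (num + 1) ∈ s then s.filter (fun y => !(y == num + 1)) else s := by
  by_cases h1 : (num - 1) ∈ s
  · simp [pvStep, h1, PySem.Set.remove?_of_mem, PySem.Set.discard]
  · by_cases h2 : (num + 1) ∈ s <;>
      simp [pvStep, h1, h2, PySem.Set.remove?_of_mem, PySem.Set.discard]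

theorem foldl_pvStep_nil (R : List Int) : List.foldl pvStep [] R = [] := by
  induction R with
  | nil => rfl
  | cons r rs ih => simpa [pvStep_eq] using ih

theorem foldl_pvStep_cons_skip (R : List Int) (L : List Int) (l : Int)
    (h : ∀ r ∈ R, l + 1 < r) :
    List.foldl pvStep (l :: L) R = l :: List.foldl pvStep L R := by
  induction R generalizing L with
  | nil => rfl
  | cons r rs ih =>
    have hr := h r (by simp)
    have h1 : (r - 1 : Int) ≠ l := by omega
    have h2 : (r + 1 : Int) ≠ l := by omega
    have hstep : pvStep (l :: L) r = l :: pvStep L r := by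
      rw [pvStep_eq, pvStep_eq]
      by_cases m1 : (r - 1) ∈ L
      · simp [m1, List.filter_cons]; omega
      · by_cases m2 : (r + 1) ∈ L <;>
          simp [m1, m2, List.filter_cons, h1, h2]; omega
    rw [List.foldl_cons, hstep, ih (pvStep L r) (fun x hx => h x (by simp [hx])), List.foldl_cons]

theorem pvStep_perm {L L' : List Int} (p : L.Perm L') (num : Int) :
    (pvStep L num).Perm (pvStep L' num) := by
  rw [pvStep_eq, pvStep_eq]
  by_cases m1 : (num - 1) ∈ L
  · simp [m1, p.mem_iff.mp m1, p.filter]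
  · have m1' : (num - 1) ∉ L' := fun h => m1 (p.mem_iff.mpr h)
    by_cases m2 : (num + 1) ∈ L
    · simp [m1, m1', m2, p.mem_iff.mp m2, p.filter]
    · have m2' : (num + 1) ∉ L' := fun h => m2 (p.mem_iff.mpr h)
      simp [m1, m1', m2, m2', p]

theorem foldl_pvStep_perm {L L' : List Int} (R : List Int) (p : L.Perm L') :
    (List.foldl pvStep L R).Perm (List.foldl pvStep L' R) := by
  induction R generalizing L L' with
  | nil => simpa using p
  | cons r rs ih => exact ih (pvStep_perm p r)

theorem fold_len (L R : List Int) (hL : L.Pairwise (· < ·)) (hR : R.Pairwise (· < ·))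
    (hd : ∀ x ∈ L, x ∉ R) :
    ((List.foldl pvStep L R).length : Int) = (L.length : Int) - altMatched L R := by
  induction L, R using altMatched.induct with
  | case1 R => simp [foldl_pvStep_nil, altMatched]
  | case2 l ls => simp [altMatched]
  | case3 l ls r rs hlt ih =>
    have hmem : ∀ x ∈ l :: ls, l ≤ x := by
      intro x hx
      rcases List.mem_cons.mp hx with h | h
      · omega
      · exact le_of_lt (List.rel_of_pairwise_cons hL h)
    have hstep : pvStep (l :: ls) r = l :: ls := by
      rw [pvStep_eq]
      have n1 : (r - 1) ∉ l :: ls := fun h => by have := hmem _ h; omega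
      have n2 : (r + 1) ∉ l :: ls := fun h => by have := hmem _ h; omega
      simp [n1, n2]
    rw [List.foldl_cons, hstep]
    have := ih hL (List.Pairwise.of_cons hR) (fun x hx hm => hd x hx (by simp [hm]))
    rw [this]
    have : altMatched (l :: ls) (r :: rs) = altMatched (l :: ls) rs := by
      rw [altMatched]; simp [hlt]
    omega
  | case4 l ls r rs hlt hgt ih =>
    have hall : ∀ r' ∈ r :: rs, l + 1 < r' := by
      intro r' hr'
      rcases List.mem_cons.mp hr' with h | h
      · omega
      · have := List.rel_of_pairwise_cons hR h; omega
    rw [foldl_pvStep_cons_skip _ _ _ hall]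
    have := ih (List.Pairwise.of_cons hL) hR (fun x hx => hd x (by simp [hx]))
    have hA : altMatched (l :: ls) (r :: rs) = altMatched ls (r :: rs) := by
      rw [altMatched]; simp [hlt, hgt]
    simp only [List.length_cons, hA]
    omega
  | case5 l ls r rs hlt hgt ih =>
    have hne : l ≠ r := fun h => hd l (by simp) (by simp [h])
    have hmem : ∀ x ∈ ls, l < x := fun x hx => List.rel_of_pairwise_cons hL hx
    have hstep : pvStep (l :: ls) r = ls := by
      rw [pvStep_eq]
      have hself : (l :: ls).filter (fun y => !(y == l)) = ls := by
        have h2 : ∀ a ∈ ls, (!(a == l)) = true := fun a ha => by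
          have := hmem a ha; simp; omega
        simp [List.filter_eq_self.mpr h2]
      rcases (by omega : r = l - 1 ∨ r = l + 1) with h | h
      · have n1 : (r - 1) ∉ l :: ls := by
          intro hm
          rcases List.mem_cons.mp hm with hh | hh
          · omega
          · have := hmem _ hh; omega
        have hv : r + 1 = l := by omega
        have hm : (r + 1) ∈ l :: ls := by simp [hv]
        rw [if_neg n1, if_pos hm, hv, hself]
      · have hv : r - 1 = l := by omega
        have hm : (r - 1) ∈ l :: ls := by simp [hv]
        rw [if_pos hm, hv, hself]
    rw [List.foldl_cons, hstep]
    have := ih (List.Pairwise.of_cons hL) (List.Pairwise.of_cons hR)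
      (fun x hx hm => hd x (by simp [hx]) (by simp [hm]))
    have hA : altMatched (l :: ls) (r :: rs) = 1 + altMatched ls rs := by
      rw [altMatched]; simp [hlt, hgt]
    simp only [List.length_cons, hA]
    omega

-- ===== VERDICT (by name: the statement is the Claim_ definition above) =====
theorem solution_spec : Claim_equal_solution := by
  intro n lost reserve _
  unfold Spec_solution solution solution_alt
  set SL := PySem.Set.diff (PySem.Set.ofList lost) (PySem.Set.ofList reserve) with hSL
  set SR := PySem.Set.diff (PySem.Set.ofList reserve) (PySem.Set.ofList lost) with hSR
  set L := PySem.List.sorted SL (fun x => x) false with hLdef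
  set R := PySem.List.sorted SR (fun x => x) false with hRdef
  have hperm : SL.Perm L := (PySem.List.sorted_perm ..).symm
  have hnodupSL : SL.Nodup := PySem.Set.nodup_diff _ _ (PySem.Set.nodup_ofList lost)
  have hnodupSR : SR.Nodup := PySem.Set.nodup_diff _ _ (PySem.Set.nodup_ofList reserve)
  have hLsort : L.Pairwise (· < ·) := by
    have hle : L.Pairwise (fun a b => a ≤ b) := by
      simpa using PySem.List.sorted_pairwise SL (fun x => x)
    have hnd : L.Nodup := hperm.nodup_iff.mp hnodupSL
    exact (hle.and hnd).imp (fun h => lt_of_le_of_ne h.1 h.2)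
  have hRsort : R.Pairwise (· < ·) := by
    have hle : R.Pairwise (fun a b => a ≤ b) := by
      simpa using PySem.List.sorted_pairwise SR (fun x => x)
    have hnd : R.Nodup := ((PySem.List.sorted_perm ..).symm.nodup_iff).mp hnodupSR
    exact (hle.and hnd).imp (fun h => lt_of_le_of_ne h.1 h.2)
  have hd : ∀ x ∈ L, x ∉ R := by
    intro x hxL hxR
    have hx1 : x ∈ SL := hperm.mem_iff.mpr hxL
    have hx2 : x ∈ SR := (PySem.List.mem_sorted ..).mp hxR
    have := (PySem.Set.mem_diff ..).mp hx1
    have := (PySem.Set.mem_diff ..).mp hx2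
    simp_all
  have hlen : (List.foldl pvStep SL R).length = (List.foldl pvStep L R).length :=
    (foldl_pvStep_perm R hperm).length_eq
  have hmain := fold_len L R hLsort hRsort hd
  simp only [PySem.Set.len]
  rw [hlen, hmain]
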